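-- pv_equiv track=rewrite | github.com/MtHenriqueF/AnySizeLabelling | AnySL-fork-qt6/AnySizeLabeling/src/digitalsreeni_image_annotator/anysize/anysize_annotations.py | IsAnnotationWithinCrop
-- ===== SOURCE A (Python) =====
-- def IsAnnotationWithinCrop(annotation, crop_x, crop_y, crop_w, crop_h):
--     """
--     Verifica se todos os pontos da segmentação estão dentro do crop.
--
--     :param annotation: dict com chave 'segmentation' contendo lista linear [x0, y0, x1, y1, ...]
--     :param crop_x: coordenada x do canto superior esquerdo do crop
--     :param crop_y: coordenada y do canto superior esquerdo do crop
--     :param crop_w: largura do crop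
--     :param crop_h: altura do crop
--     :return: True se todos os pontos estão dentro do crop, False caso contrário
--     """
--
--     segmentation = annotation.get('segmentation', [])
--
--     if not segmentation or len(segmentation) % 2 != 0:
--         return False  # inválido
--
--     max_x = crop_x + crop_w
--     max_y = crop_y + crop_h
--
--     # Itera sobre pares (x, y)
--     for i in range(0, len(segmentation), 2):
--         x, y = segmentation[i], segmentation[i + 1]
--         if not (crop_x <= x < max_x and crop_y <= y < max_y):
--             return False  # ponto fora do crop
--     return True  # todos os pontos dentro do crop
-- ===== SOURCE B (Python) =====
-- def IsAnnotationWithinCrop(annotation, crop_x, crop_y, crop_w, crop_h):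
--     segmentation = annotation.get('segmentation', [])
--
--     if not segmentation or len(segmentation) % 2 != 0:
--         return False  # invalid segmentation
--
--     xs = segmentation[0::2]
--     ys = segmentation[1::2]
--
--     return (crop_x <= min(xs) and max(xs) < crop_x + crop_w
--             and crop_y <= min(ys) and max(ys) < crop_y + crop_h)
-- ===== Notes on version B (the rewrite author's own statement) =====
-- stated objective: idiomatic
-- what changed: Replaces the index-driven per-point loop with early exit by slicing the flat list into x- and y-coordinate lists and comparing their min/max against the crop bounds.
import Mathlib
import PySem

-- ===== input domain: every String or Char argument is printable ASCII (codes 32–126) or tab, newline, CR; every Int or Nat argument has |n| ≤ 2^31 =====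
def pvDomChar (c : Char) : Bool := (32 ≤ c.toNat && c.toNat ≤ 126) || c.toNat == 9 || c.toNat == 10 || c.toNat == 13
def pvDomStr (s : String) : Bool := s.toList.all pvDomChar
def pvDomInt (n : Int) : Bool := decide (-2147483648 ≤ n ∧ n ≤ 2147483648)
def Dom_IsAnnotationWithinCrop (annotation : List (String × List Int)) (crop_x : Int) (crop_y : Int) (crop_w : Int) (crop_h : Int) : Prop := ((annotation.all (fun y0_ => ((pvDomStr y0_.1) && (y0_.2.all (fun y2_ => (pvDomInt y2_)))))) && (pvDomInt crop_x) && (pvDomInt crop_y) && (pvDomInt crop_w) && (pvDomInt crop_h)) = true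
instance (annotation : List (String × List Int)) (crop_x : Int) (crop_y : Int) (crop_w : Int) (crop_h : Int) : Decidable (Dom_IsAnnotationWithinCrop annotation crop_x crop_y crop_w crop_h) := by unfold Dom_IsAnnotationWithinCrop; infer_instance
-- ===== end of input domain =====

-- B replaces A's index-driven per-point loop (early exit) by slicing the flat list into the
-- x- and y-coordinate lists and comparing their min/max against the crop bounds (idiomatic; same O(n)).

-- ===== PORT A =====
-- the 'for i in range(0, len(segmentation), 2)' loop of A, returning False early on a point outside
def pvLoopA (seg : List Int) (cx cy mx my : Int) : List Int → Bool
  | [] => true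
  | i :: rest =>
    match PySem.List.pyGet? seg i, PySem.List.pyGet? seg (i + 1) with
    | some x, some y =>
      if cx ≤ x ∧ x < mx ∧ cy ≤ y ∧ y < my then pvLoopA seg cx cy mx my rest
      else false
    | _, _ => false

def IsAnnotationWithinCrop (annotation : List (String × List Int)) (crop_x : Int) (crop_y : Int) (crop_w : Int) (crop_h : Int) : Bool :=
  let segmentation := PySem.Dict.getD ⟨annotation⟩ "segmentation" []
  if segmentation.isEmpty || segmentation.length % 2 != 0 then false
  else
    pvLoopA segmentation crop_x crop_y (crop_x + crop_w) (crop_y + crop_h)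
      (PySem.List.pyRange 0 (segmentation.length : Int) 2)

-- ===== PORT B =====
def IsAnnotationWithinCrop_alt (annotation : List (String × List Int)) (crop_x : Int) (crop_y : Int) (crop_w : Int) (crop_h : Int) : Bool :=
  let segmentation := PySem.Dict.getD ⟨annotation⟩ "segmentation" []
  if segmentation.isEmpty || segmentation.length % 2 != 0 then false
  else
    match PySem.List.slice? segmentation (some 0) none 2,
          PySem.List.slice? segmentation (some 1) none 2 with
    | some xs, some ys =>
      match PySem.List.min? xs (fun v => v), PySem.List.max? xs (fun v => v),
            PySem.List.min? ys (fun v => v), PySem.List.max? ys (fun v => v) with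
      | some mnx, some mxx, some mny, some mxy =>
          decide (crop_x ≤ mnx) && decide (mxx < crop_x + crop_w) &&
          decide (crop_y ≤ mny) && decide (mxy < crop_y + crop_h)
      | _, _, _, _ => false  -- unreachable: under the guard both slices are nonempty
    | _, _ => false  -- unreachable: step 2 ≠ 0

-- ===== PRECONDITION & SPEC =====
def Spec_IsAnnotationWithinCrop (annotation : List (String × List Int)) (crop_x : Int) (crop_y : Int) (crop_w : Int) (crop_h : Int) (out : Bool) : Prop := out = IsAnnotationWithinCrop_alt annotation crop_x crop_y crop_w crop_h
instance (annotation : List (String × List Int)) (crop_x : Int) (crop_y : Int) (crop_w : Int) (crop_h : Int) (out : Bool) : Decidable (Spec_IsAnnotationWithinCrop annotation crop_x crop_y crop_w crop_h out) := by unfold Spec_IsAnnotationWithinCrop; infer_instance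

-- ===== CLAIM (what is proved, stated in full; the proofs are below) =====
def Claim_equal_IsAnnotationWithinCrop : Prop := ∀ (annotation : List (String × List Int)) (crop_x : Int) (crop_y : Int) (crop_w : Int) (crop_h : Int), Dom_IsAnnotationWithinCrop annotation crop_x crop_y crop_w crop_h → Spec_IsAnnotationWithinCrop annotation crop_x crop_y crop_w crop_h (IsAnnotationWithinCrop annotation crop_x crop_y crop_w crop_h)

-- ===== LEMMAS AND PROOFS =====

-- every other element of a list, starting at the head
def pvEvens : List Int → List Int
  | [] => []
  | [x] => [x]
  | x :: _ :: r => x :: pvEvens r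

-- A's per-pair condition folded over the flat list (false on a dangling odd element)
def pvPairsOK (cx cy mx my : Int) : List Int → Bool
  | [] => true
  | [_] => false
  | x :: y :: r =>
    (decide (cx ≤ x) && decide (x < mx) && decide (cy ≤ y) && decide (y < my))
      && pvPairsOK cx cy mx my r

theorem pvRange2_nil (a b : Int) (h : b ≤ a) : PySem.List.pyRange a b 2 = [] := by
  rw [PySem.List.pyRange_of_pos a b (by norm_num)]
  simp [show ¬ a < b by omega]

theorem pvRange2_cons (a b : Int) (h : a < b) :
    PySem.List.pyRange a b 2 = a :: PySem.List.pyRange (a + 2) b 2 := by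
  rw [PySem.List.pyRange_of_pos a b (by norm_num), PySem.List.pyRange_of_pos (a + 2) b (by norm_num)]
  have hc : (if a < b then ((b - a + 2 - 1) / 2).toNat else 0)
      = (if a + 2 < b then ((b - (a + 2) + 2 - 1) / 2).toNat else 0) + 1 := by
    split_ifs <;> omega
  rw [hc, List.range_succ_eq_map]
  simp only [List.map_cons, List.map_map, Nat.cast_zero, mul_zero, add_zero]
  congr 1
  apply List.map_congr_left
  intro k _
  simp only [Function.comp_apply]
  push_cast
  ring

-- A's loop over range(i, len(seg), 2) is pvPairsOK on the suffix seg.drop i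
theorem pvLoopA_eq (cx cy mx my : Int) :
    ∀ (rest : List Int), ∀ (seg : List Int) (i : ℕ), seg.drop i = rest →
      pvLoopA seg cx cy mx my (PySem.List.pyRange (i : Int) (seg.length : Int) 2)
        = pvPairsOK cx cy mx my rest := by
  intro rest
  induction rest using pvEvens.induct with
  | case1 =>
    intro seg i hd
    have hlen : seg.length ≤ i := by
      have := congrArg List.length hd; simp at this; omega
    rw [pvRange2_nil _ _ (by exact_mod_cast hlen)]
    simp [pvLoopA, pvPairsOK]
  | case2 x =>
    intro seg i hd
    have hlen : seg.length = i + 1 := by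
      have := congrArg List.length hd; simp at this; omega
    have hi : (i : Int) < (seg.length : Int) := by exact_mod_cast (by omega : i < seg.length)
    rw [pvRange2_cons _ _ hi]
    have h0 : seg[i]? = (seg.drop i)[0]? := by simp
    have hx : PySem.List.pyGet? seg (i : Int) = some x := by
      rw [PySem.List.pyGet?_natCast, h0, hd]; rfl
    have h1 : seg[i + 1]? = (seg.drop i)[1]? := by simp
    have hy : PySem.List.pyGet? seg ((i : Int) + 1) = none := by
      rw [show ((i : Int) + 1) = ((i + 1 : ℕ) : Int) by push_cast; ring, PySem.List.pyGet?_natCast,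
        h1, hd]; rfl
    simp [pvLoopA, hx, hy, pvPairsOK]
  | case3 x y r ih =>
    intro seg i hd
    have hlen : seg.length = i + (r.length + 2) := by
      have := congrArg List.length hd; simp at this; omega
    have hi : (i : Int) < (seg.length : Int) := by exact_mod_cast (by omega : i < seg.length)
    rw [pvRange2_cons _ _ hi]
    have h0 : seg[i]? = (seg.drop i)[0]? := by simp
    have hx : PySem.List.pyGet? seg (i : Int) = some x := by
      rw [PySem.List.pyGet?_natCast, h0, hd]; rfl
    have h1 : seg[i + 1]? = (seg.drop i)[1]? := by simp
    have hy : PySem.List.pyGet? seg ((i : Int) + 1) = some y := by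
      rw [show ((i : Int) + 1) = ((i + 1 : ℕ) : Int) by push_cast; ring, PySem.List.pyGet?_natCast,
        h1, hd]
      simp
    have hdrop : seg.drop (i + 2) = r := by
      have h2 : seg.drop (i + 2) = (seg.drop i).drop 2 := by
        rw [List.drop_drop, Nat.add_comm]
      simp [h2, hd]
    have hrec := ih seg (i + 2) hdrop
    rw [show ((i : Int) + 2) = ((i + 2 : ℕ) : Int) by push_cast; ring]
    simp only [pvLoopA, hx, hy, pvPairsOK, hrec]
    by_cases hcond : cx ≤ x ∧ x < mx ∧ cy ≤ y ∧ y < my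
    · obtain ⟨c1, c2, c3, c4⟩ := hcond
      simp [c1, c2, c3, c4]
    · rw [if_neg hcond]
      rcases Decidable.not_and_iff_or_not.mp hcond with h' | h'
      · simp [h']
      · rcases Decidable.not_and_iff_or_not.mp h' with h'' | h''
        · simp [h'']
        · rcases Decidable.not_and_iff_or_not.mp h'' with h3 | h4
          · simp [h3]
          · simp [h4]

-- the index list a slice with step 2 reads off is pvEvens of the dropped list
theorem pvFilterMap_evens : ∀ (xs : List Int),
    (List.range ((xs.length + 1) / 2)).filterMap (fun k => xs[2 * k]?) = pvEvens xs := by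
  intro xs
  induction xs using pvEvens.induct with
  | case1 => simp [pvEvens]
  | case2 x => simp [pvEvens, List.range_succ]
  | case3 x y r ih =>
    have hn : ((x :: y :: r).length + 1) / 2 = (r.length + 1) / 2 + 1 := by
      simp; omega
    rw [hn, List.range_succ_eq_map]
    simp only [List.filterMap_cons, mul_zero]
    simp only [List.getElem?_cons_zero, List.filterMap_map]
    rw [pvEvens]
    congr 1

theorem pvSlice2 (xs : List Int) (a : ℕ) :
    PySem.List.slice? xs (some (a : Int)) none 2 = some (pvEvens (xs.drop a)) := by
  simp only [PySem.List.slice?, PySem.List.sliceIndices]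
  rw [if_neg (by norm_num : ¬ ((2:ℤ) = 0))]
  simp only [if_neg (by norm_num : ¬ ((2:ℤ) < 0)), if_pos (by norm_num : (0:ℤ) < 2),
    if_neg (not_lt.mpr (Int.natCast_nonneg a))]
  by_cases h : a < xs.length
  · rw [min_eq_left (show (a:ℤ) ≤ ↑xs.length by exact_mod_cast h.le)]
    rw [if_pos (show (a:ℤ) < ↑xs.length by exact_mod_cast h)]
    have hcount : ((↑xs.length - ↑a + 2 - 1 : ℤ) / 2).toNat = ((xs.drop a).length + 1) / 2 := by
      simp only [List.length_drop]; omega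
    rw [hcount, ← pvFilterMap_evens (xs.drop a)]
    congr 1
    apply List.filterMap_congr
    intro k _
    have hk : ((↑a + 2 * (↑k : ℤ)).toNat) = a + 2 * k := by omega
    rw [hk]
    simp [List.getElem?_drop]
  · rw [min_eq_right (show (xs.length:ℤ) ≤ ↑a by exact_mod_cast Nat.le_of_not_lt h)]
    rw [if_neg (lt_irrefl _)]
    simp [List.drop_eq_nil_of_le (Nat.le_of_not_lt h), pvEvens]

-- pvPairsOK of an even-length list splits into an x-condition and a y-condition
theorem pvPairs_all (cx cy mx my : Int) :
    ∀ (seg : List Int), seg.length % 2 = 0 →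
      pvPairsOK cx cy mx my seg
        = ((pvEvens seg).all (fun x => decide (cx ≤ x) && decide (x < mx))
            && (pvEvens (seg.drop 1)).all (fun y => decide (cy ≤ y) && decide (y < my))) := by
  intro seg
  induction seg using pvEvens.induct with
  | case1 => intro _; simp [pvPairsOK, pvEvens]
  | case2 x => intro h; simp at h
  | case3 x y r ih =>
    intro h
    have hr : r.length % 2 = 0 := by simp at h; omega
    have hyr : pvEvens (y :: r) = y :: pvEvens (r.drop 1) := by
      cases r with
      | nil => simp [pvEvens]
      | cons z r' => simp [pvEvens]
    simp only [pvPairsOK, pvEvens, List.drop_succ_cons, List.drop_zero, hyr, List.all_cons,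
      ih hr]
    generalize decide (cx ≤ x) = b1
    generalize decide (x < mx) = b2
    generalize decide (cy ≤ y) = b3
    generalize decide (y < my) = b4
    generalize ((pvEvens r).all _) = b5
    generalize ((pvEvens (r.drop 1)).all _) = b6
    revert b1 b2 b3 b4 b5 b6
    decide

-- a min/max bracket check equals the pointwise check on a list both extrema come from
theorem pvMinMax_all (c M : Int) (xs : List Int) (mn mx : Int)
    (hmn : PySem.List.min? xs (fun v => v) = some mn)
    (hmx : PySem.List.max? xs (fun v => v) = some mx) :
    (decide (c ≤ mn) && decide (mx < M)) = xs.all (fun x => decide (c ≤ x) && decide (x < M)) := by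
  rw [Bool.eq_iff_iff]
  simp only [Bool.and_eq_true, decide_eq_true_eq, List.all_eq_true]
  constructor
  · rintro ⟨h1, h2⟩ x hx
    exact ⟨le_trans h1 (PySem.List.min?_isMin hmn x hx),
           lt_of_le_of_lt (PySem.List.max?_isMax hmx x hx) h2⟩
  · intro h
    exact ⟨(h mn (PySem.List.min?_mem hmn)).1, (h mx (PySem.List.max?_mem hmx)).2⟩

-- ===== VERDICT (by name: the statement is the Claim_ definition above) =====
theorem IsAnnotationWithinCrop_spec : Claim_equal_IsAnnotationWithinCrop := by
  intro annotation cx cy cw ch _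
  unfold Spec_IsAnnotationWithinCrop IsAnnotationWithinCrop IsAnnotationWithinCrop_alt
  set seg := PySem.Dict.getD ⟨annotation⟩ "segmentation" [] with hseg
  by_cases hg : seg.isEmpty || seg.length % 2 != 0
  · simp only [hg, if_true]
  · rw [Bool.not_eq_true] at hg
    simp only [hg, Bool.false_eq_true, if_false]
    rw [Bool.or_eq_false_iff] at hg
    have hne : seg ≠ [] := by
      have := hg.1; simpa [List.isEmpty_iff] using this
    have hev : seg.length % 2 = 0 := by
      have := hg.2; simp only [bne_eq_false_iff_eq] at this; exact this
    have hs0 := pvSlice2 seg 0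
    have hs1 := pvSlice2 seg 1
    norm_num at hs0 hs1
    rw [hs0, hs1]
    obtain ⟨x, rest, hseg2⟩ := List.exists_cons_of_ne_nil hne
    obtain ⟨y, r, hrest⟩ : ∃ y r, rest = y :: r := by
      cases rest with
      | nil => rw [hseg2] at hev; simp at hev
      | cons b t => exact ⟨b, t, rfl⟩
    rw [hseg2, hrest] at hev ⊢
    have hxs : pvEvens (x :: y :: r) = x :: pvEvens r := rfl
    have hys : pvEvens ((x :: y :: r).drop 1) = y :: pvEvens (r.drop 1) := by
      cases r with
      | nil => simp [pvEvens]
      | cons z r' => simp [pvEvens]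
    rw [hxs, show (x :: y :: r).tail = y :: r from rfl,
      show pvEvens (y :: r) = y :: pvEvens (r.drop 1) from by
        cases r with
        | nil => simp [pvEvens]
        | cons z r' => simp [pvEvens]]
    obtain ⟨mnx, hmnx⟩ : ∃ m, PySem.List.min? (x :: pvEvens r) (fun v => v) = some m := by
      cases h : PySem.List.min? (x :: pvEvens r) (fun v => v) with
      | none => exact absurd ((PySem.List.min?_eq_none_iff _ _).mp h) (by simp)
      | some m => exact ⟨m, rfl⟩
    obtain ⟨mxx, hmxx⟩ : ∃ m, PySem.List.max? (x :: pvEvens r) (fun v => v) = some m := by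
      cases h : PySem.List.max? (x :: pvEvens r) (fun v => v) with
      | none => exact absurd ((PySem.List.max?_eq_none_iff _ _).mp h) (by simp)
      | some m => exact ⟨m, rfl⟩
    obtain ⟨mny, hmny⟩ : ∃ m, PySem.List.min? (y :: pvEvens (r.drop 1)) (fun v => v) = some m := by
      cases h : PySem.List.min? (y :: pvEvens (r.drop 1)) (fun v => v) with
      | none => exact absurd ((PySem.List.min?_eq_none_iff _ _).mp h) (by simp)
      | some m => exact ⟨m, rfl⟩
    obtain ⟨mxy, hmxy⟩ : ∃ m, PySem.List.max? (y :: pvEvens (r.drop 1)) (fun v => v) = some m := by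
      cases h : PySem.List.max? (y :: pvEvens (r.drop 1)) (fun v => v) with
      | none => exact absurd ((PySem.List.max?_eq_none_iff _ _).mp h) (by simp)
      | some m => exact ⟨m, rfl⟩
    dsimp only
    rw [hmnx, hmxx, hmny, hmxy]
    have hA := pvLoopA_eq cx cy (cx + cw) (cy + ch) (x :: y :: r) (x :: y :: r) 0 (by simp)
    simp only [Nat.cast_zero] at hA
    rw [hA, pvPairs_all cx cy (cx + cw) (cy + ch) _ hev]
    rw [hxs, hys]
    dsimp only
    rw [← pvMinMax_all cx (cx + cw) _ _ _ hmnx hmxx,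
        ← pvMinMax_all cy (cy + ch) _ _ _ hmny hmxy]
    generalize decide (cx ≤ mnx) = b1
    generalize decide (mxx < cx + cw) = b2
    generalize decide (cy ≤ mny) = b3
    generalize decide (mxy < cy + ch) = b4
    revert b1 b2 b3 b4
    decide
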